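-- pv_equiv track=rewrite | github.com/karelbondan/Wolf | Wolf/screenshot.py | check_userinput
-- ===== SOURCE A (Python) =====
-- predictions = ['take', 'a', 'screenshot', 'my', 'the', 'screen', 'window', 'app']
--
-- abort = ['how', 'search', 'to']
--
-- def check_userinput(input):
--     counter = 0
--     user_input = input.split()
--     for prediction in user_input:
--         if prediction in predictions:
--             counter += 1
--         elif prediction in abort:  # if any of abort's indexes are in user input then abort
--             counter = 0
--             break
--         else:
--             pass
--     return counter
-- ===== SOURCE B (Python) =====
-- predictions = ['take', 'a', 'screenshot', 'my', 'the', 'screen', 'window', 'app']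
--
-- abort = ['how', 'search', 'to']
--
-- def check_userinput(input):
--     words = input.split()
--     if any(w in abort for w in words):
--         return 0
--     return sum(w in predictions for w in words)
-- ===== Notes on version B (the rewrite author's own statement) =====
-- stated objective: simpler
-- what changed: Replaced the single accumulating loop with early break by two declarative passes: a short-circuit any() abort check, then a sum() count of recognized words.
import Mathlib
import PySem

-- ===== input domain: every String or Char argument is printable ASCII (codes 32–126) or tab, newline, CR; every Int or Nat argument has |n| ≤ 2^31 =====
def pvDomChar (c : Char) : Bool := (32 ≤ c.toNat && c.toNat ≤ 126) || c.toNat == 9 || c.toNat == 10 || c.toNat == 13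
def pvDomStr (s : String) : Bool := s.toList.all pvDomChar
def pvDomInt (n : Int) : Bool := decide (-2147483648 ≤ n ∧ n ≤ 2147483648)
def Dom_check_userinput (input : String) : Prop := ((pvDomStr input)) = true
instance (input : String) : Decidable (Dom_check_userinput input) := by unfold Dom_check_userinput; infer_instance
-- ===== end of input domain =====

-- B replaces A's accumulating loop with break by an any-abort guard then a count; objective: simpler.

-- ===== PORT A =====
def pv_predictions : List String := ["take", "a", "screenshot", "my", "the", "screen", "window", "app"]

def pv_abort : List String := ["how", "search", "to"]

-- A's for-loop with break, as structural recursion over the remaining words with the counter as state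
def check_userinput_loop (ws : List String) (counter : Int) : Int :=
  match ws with
  | [] => counter
  | w :: rest =>
    if w ∈ pv_predictions then check_userinput_loop rest (counter + 1)
    else if w ∈ pv_abort then 0   -- counter = 0; break
    else check_userinput_loop rest counter

def check_userinput (input : String) : Int :=
  check_userinput_loop (PySem.Str.split₀ input) 0

-- ===== PORT B =====
def check_userinput_alt (input : String) : Int :=
  let words := PySem.Str.split₀ input
  if words.any (fun w => w ∈ pv_abort) then 0
  else (words.countP (fun w => w ∈ pv_predictions) : Int)

-- ===== PRECONDITION & SPEC =====
def Spec_check_userinput (input : String) (out : Int) : Prop := out = check_userinput_alt input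
instance (input : String) (out : Int) : Decidable (Spec_check_userinput input out) := by unfold Spec_check_userinput; infer_instance

-- ===== CLAIM (what is proved, stated in full; the proofs are below) =====
def Claim_equal_check_userinput : Prop := ∀ (input : String), Dom_check_userinput input → Spec_check_userinput input (check_userinput input)

-- ===== LEMMAS AND PROOFS =====
theorem check_userinput_loop_eq (ws : List String) (c : Int) :
    check_userinput_loop ws c =
      (if ws.any (fun w => w ∈ pv_abort) then 0
       else c + (ws.countP (fun w => w ∈ pv_predictions) : Int)) := by
  induction ws generalizing c with
  | nil => simp [check_userinput_loop]
  | cons w rest ih =>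
    simp only [check_userinput_loop, List.any_cons, List.countP_cons]
    by_cases hp : w ∈ pv_predictions
    · have ha : w ∉ pv_abort := by
        revert hp; simp [pv_predictions, pv_abort]; intro h; rcases h with h|h|h|h|h|h|h|h <;> simp [h]
      rw [if_pos hp, ih]
      simp [ha, hp]
      split_ifs <;> push_cast <;> ring
    · rw [if_neg hp]
      by_cases ha : w ∈ pv_abort
      · simp [ha]
      · rw [if_neg ha, ih]
        simp [ha, hp]

-- ===== VERDICT (by name: the statement is the Claim_ definition above) =====
theorem check_userinput_spec : Claim_equal_check_userinput := by
  intro input _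
  unfold Spec_check_userinput check_userinput check_userinput_alt
  rw [check_userinput_loop_eq]
  simp
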